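-- pv_equiv track=rewrite | github.com/BINEETH25/Learnings | Leetcode/Hard/Longest_SubSequence_k_2014.py | generateOrderedSubsequencesWithFreq
-- ===== SOURCE A (Python) =====
-- def generateOrderedSubsequencesWithFreq(s: str, k: int):
--     freq_map = {}
--     path = []
--
--     def backtrack(start):
--         if len(path) == 3:
--             subseq = ''.join(path)
--             freq_map[subseq] = freq_map.get(subseq, 0) + 1
--             return
--
--         for i in range(start, len(s)):
--             path.append(s[i])
--             backtrack(i + 1)  # Only explore forward characters
--             path.pop()
--
--     backtrack(0)
--
--     return freq_map
-- ===== SOURCE B (Python) =====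
-- def generateOrderedSubsequencesWithFreq(s: str, k: int):
--     # One backward pass builds, for each suffix, the ordered lists of length-1 and
--     # length-2 subsequences; each position contributes a block of length-3
--     # subsequences starting there.  A single counting pass over the blocks
--     # (in position order) then produces the frequency map.
--     ones, twos, blocks = [], [], []
--     for c in reversed(s):
--         blocks.append([c + t for t in twos])
--         twos = [c + u for u in ones] + twos
--         ones = [c] + ones
--     freq = {}
--     for block in reversed(blocks):
--         for sub in block:
--             freq[sub] = freq.get(sub, 0) + 1
--     return freq
-- ===== Notes on version B (the rewrite author's own statement) =====
-- stated objective: alternative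
-- what changed: Replaces the index-based backtracking recursion (shared mutable path, dict updated at each leaf) with a single backward pass that builds explicit ordered lists of length-1/2 subsequences per suffix and a block of length-3 subsequences per position, followed by one counting pass over the blocks.
import Mathlib
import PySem

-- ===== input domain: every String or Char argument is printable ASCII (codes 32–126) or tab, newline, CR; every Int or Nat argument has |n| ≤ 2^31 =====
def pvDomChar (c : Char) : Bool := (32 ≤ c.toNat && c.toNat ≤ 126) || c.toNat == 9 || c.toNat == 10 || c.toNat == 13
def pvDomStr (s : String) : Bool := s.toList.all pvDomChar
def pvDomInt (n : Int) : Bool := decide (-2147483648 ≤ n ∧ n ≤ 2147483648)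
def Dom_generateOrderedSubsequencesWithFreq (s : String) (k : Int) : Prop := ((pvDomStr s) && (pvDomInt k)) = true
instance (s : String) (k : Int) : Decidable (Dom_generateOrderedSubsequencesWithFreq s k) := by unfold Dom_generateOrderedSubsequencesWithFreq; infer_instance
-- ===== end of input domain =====

-- B replaces A's backtracking recursion by a backward pass building explicit ordered
-- subsequence lists plus one counting pass (objective: alternative; same O(n^3) cost).

-- ===== PORT A =====
-- A's nested closure `backtrack(start)` with the shared mutable `path` and `freq_map`:
-- the loop body appends s[i], recurses, pops — i.e. the recursive call sees path ++ [s[i]].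
-- `fuel` only makes the recursion structurally total; the `len(path) == 3` guard fires
-- before fuel could ever run out on the actual calls (initial fuel 3 = recursion depth).
def pvBtA (cs : List Char) : Nat → List Char → Int → PySem.Dict String Int → PySem.Dict String Int
  | fuel, path, start, freq =>
    if path.length = 3 then
      freq.insert (String.ofList path) (freq.getD (String.ofList path) 0 + 1)
    else
      match fuel with
      | 0 => freq
      | fuel' + 1 =>
        (PySem.List.pyRange start (cs.length : Int) 1).foldl
          (fun fr i => pvBtA cs fuel' (path ++ [PySem.List.pyGetD cs i ' ']) (i + 1) fr) freq

def generateOrderedSubsequencesWithFreq (s : String) (k : Int) : List (String × Int) :=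
  (pvBtA s.toList 3 [] 0 PySem.Dict.empty).items

-- ===== PORT B =====
-- state = (ones, twos, blocks); Python strings in the lists are carried as List Char
-- (exact: `c + t` is `c :: t`), turned into String only when used as a dict key.
def pvStepB (st : List (List Char) × List (List Char) × List (List (List Char))) (c : Char) :
    List (List Char) × List (List Char) × List (List (List Char)) :=
  ([c] :: st.1, st.1.map (fun u => c :: u) ++ st.2.1, st.2.2 ++ [st.2.1.map (fun t => c :: t)])

def generateOrderedSubsequencesWithFreq_alt (s : String) (k : Int) : List (String × Int) :=
  let st := s.toList.reverse.foldl pvStepB ([], [], [])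
  let freq := st.2.2.reverse.foldl
    (fun fr block => block.foldl
      (fun fr t => fr.insert (String.ofList t) (fr.getD (String.ofList t) 0 + 1)) fr)
    PySem.Dict.empty
  freq.items

-- ===== PRECONDITION & SPEC =====
def Spec_generateOrderedSubsequencesWithFreq (s : String) (k : Int) (out : List (String × Int)) : Prop := out = generateOrderedSubsequencesWithFreq_alt s k
instance (s : String) (k : Int) (out : List (String × Int)) : Decidable (Spec_generateOrderedSubsequencesWithFreq s k out) := by unfold Spec_generateOrderedSubsequencesWithFreq; infer_instance

-- ===== CLAIM (what is proved, stated in full; the proofs are below) =====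
def Claim_equal_generateOrderedSubsequencesWithFreq : Prop := ∀ (s : String) (k : Int), Dom_generateOrderedSubsequencesWithFreq s k → Spec_generateOrderedSubsequencesWithFreq s k (generateOrderedSubsequencesWithFreq s k)

-- ===== LEMMAS AND PROOFS =====

-- ordered list of the length-m subsequences of cs (lexicographic in index triples)
def pvSubs : Nat → List Char → List (List Char)
  | 0, _ => [[]]
  | _ + 1, [] => []
  | m + 1, c :: rest => (pvSubs m rest).map (fun t => c :: t) ++ pvSubs (m + 1) rest

-- B's per-position blocks, characterized structurally
def pvBlocks : List Char → List (List (List Char))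
  | [] => []
  | c :: rest => pvBlocks rest ++ [(pvSubs 2 rest).map (fun t => c :: t)]

lemma pvStepB_state (cs : List Char) :
    cs.reverse.foldl pvStepB ([], [], []) = (pvSubs 1 cs, pvSubs 2 cs, pvBlocks cs) := by
  induction cs with
  | nil => simp [pvSubs, pvBlocks]
  | cons c rest ih =>
      simp only [List.reverse_cons, List.foldl_append, List.foldl_cons, List.foldl_nil, ih]
      simp [pvStepB, pvSubs, pvBlocks]

lemma pvBlocks_flatten (cs : List Char) :
    (pvBlocks cs).reverse.flatten = pvSubs 3 cs := by
  induction cs with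
  | nil => simp [pvBlocks, pvSubs]
  | cons c rest ih => simp [pvBlocks, pvSubs, ih]

def pvBump (fr : PySem.Dict String Int) (t : String) : PySem.Dict String Int :=
  fr.insert t (fr.getD t 0 + 1)

-- inner loop of A: folding `backtrack` over range(start, n) is folding pvSubs (d+1) of the suffix
lemma pvBtA_loop (cs : List Char) (d : Nat)
    (IH : ∀ (path : List Char) (start : Int) (freq), path.length = 3 - d → 0 ≤ start →
      pvBtA cs d path start freq
        = (pvSubs d (cs.drop start.toNat)).foldl (fun fr t => pvBump fr (String.ofList (path ++ t))) freq)
    (path : List Char) (hp : path.length = 3 - (d + 1)) (hd : d + 1 ≤ 3)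
    (start : Int) (freq : PySem.Dict String Int) (hs : 0 ≤ start) :
      (PySem.List.pyRange start (cs.length : Int) 1).foldl
          (fun fr i => pvBtA cs d (path ++ [PySem.List.pyGetD cs i ' ']) (i + 1) fr) freq
        = (pvSubs (d + 1) (cs.drop start.toNat)).foldl
            (fun fr t => pvBump fr (String.ofList (path ++ t))) freq := by
  by_cases hlt : start < (cs.length : Int)
  · have hstn : start.toNat < cs.length := by omega
    rw [PySem.List.pyRange_one_cons hlt, List.foldl_cons]
    rw [PySem.List.pyGetD_eq_getElem cs ' ' hs hlt]
    rw [IH (path ++ [cs[start.toNat]]) (start + 1) freq (by simpa using by omega) (by omega)]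
    rw [pvBtA_loop cs d IH path hp hd (start + 1) _ (by omega)]
    rw [List.drop_eq_getElem_cons hstn]
    have hto : (start + 1).toNat = start.toNat + 1 := by omega
    rw [hto]
    show _ = ((pvSubs d (cs.drop (start.toNat + 1))).map (fun t => cs[start.toNat] :: t)
        ++ pvSubs (d + 1) (cs.drop (start.toNat + 1))).foldl
        (fun fr t => pvBump fr (String.ofList (path ++ t))) freq
    rw [List.foldl_append, List.foldl_map]
    simp only [List.append_assoc, List.singleton_append]
  · have hnil : PySem.List.pyRange start (cs.length : Int) 1 = [] :=
      PySem.List.pyRange_one_eq_nil (by omega)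
    have hdrop : cs.drop start.toNat = [] := List.drop_eq_nil_of_le (by omega)
    rw [hnil, hdrop]
    cases d <;> simp [pvSubs]
termination_by cs.length - start.toNat

lemma pvBtA_eq (cs : List Char) (d : Nat) (hd : d ≤ 3) :
    ∀ (path : List Char) (start : Int) (freq), path.length = 3 - d → 0 ≤ start →
      pvBtA cs d path start freq
        = (pvSubs d (cs.drop start.toNat)).foldl (fun fr t => pvBump fr (String.ofList (path ++ t))) freq := by
  induction d with
  | zero =>
      intro path start freq hp _
      simp only [Nat.sub_zero] at hp
      simp [pvBtA, hp, pvSubs, pvBump]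
  | succ d ih =>
      intro path start freq hp hs
      have hd' : d ≤ 3 := by omega
      rw [pvBtA]
      have hne : ¬ path.length = 3 := by omega
      rw [if_neg hne]
      exact pvBtA_loop cs d (ih hd') path hp hd start freq hs

-- ===== VERDICT (by name: the statement is the Claim_ definition above) =====
theorem generateOrderedSubsequencesWithFreq_spec : Claim_equal_generateOrderedSubsequencesWithFreq := by
  intro s k _
  unfold Spec_generateOrderedSubsequencesWithFreq
  unfold generateOrderedSubsequencesWithFreq generateOrderedSubsequencesWithFreq_alt
  rw [pvStepB_state]
  have hA := pvBtA_eq s.toList 3 (by omega) [] 0 PySem.Dict.empty rfl (by omega)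
  simp only [Int.toNat_zero, List.drop_zero, List.nil_append] at hA
  rw [hA]
  congr 1
  rw [← pvBlocks_flatten s.toList, List.foldl_flatten]
  rfl
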